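-- pv_equiv track=rewrite | github.com/pinstripezebra/optirun | utility/data_query.py | validate_registration
-- ===== SOURCE A (Python) =====
-- def validate_registration(name: str, password: str, latitude: str, longitude: str):
--
--     """Checks to ensure user registration information meets requirements"""
--
--     error = ""
--     if len(name) < 6:
--         error = "Username must be at least 6 characters"
--     elif len(password) < 6:
--         error = "password must be at least 6 characters"
--     elif not any(char.isnumeric() for char in password):
--         error = "password must contain a number"
--     elif not any(char.isalpha() for char in password):
--         error = "password must contain a letter"
--     elif not any(not c.isalnum() for c in password):
--         error = "password must contain a special character"
--     else:
--         error = "no error"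
--     return error
-- ===== SOURCE B (Python) =====
-- def validate_registration(name: str, password: str, latitude: str, longitude: str):
--     """Checks to ensure user registration information meets requirements"""
--     if len(name) < 6:
--         return "Username must be at least 6 characters"
--     if len(password) < 6:
--         return "password must be at least 6 characters"
--     # single pass: compute all three character-class flags at once
--     has_digit = has_alpha = has_special = False
--     for c in password:
--         if c.isnumeric():
--             has_digit = True
--         if c.isalpha():
--             has_alpha = True
--         if not c.isalnum():
--             has_special = True
--     if not has_digit:
--         return "password must contain a number"
--     if not has_alpha:
--         return "password must contain a letter"
--     if not has_special:
--         return "password must contain a special character"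
--     return "no error"
-- ===== Notes on version B (the rewrite author's own statement) =====
-- stated objective: alternative
-- what changed: Replaces A's three separate lazy any(...) scans of the password by a single accumulator pass that computes the digit/letter/special flags at once, then selects the first failing message from the flags.
import Mathlib
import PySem

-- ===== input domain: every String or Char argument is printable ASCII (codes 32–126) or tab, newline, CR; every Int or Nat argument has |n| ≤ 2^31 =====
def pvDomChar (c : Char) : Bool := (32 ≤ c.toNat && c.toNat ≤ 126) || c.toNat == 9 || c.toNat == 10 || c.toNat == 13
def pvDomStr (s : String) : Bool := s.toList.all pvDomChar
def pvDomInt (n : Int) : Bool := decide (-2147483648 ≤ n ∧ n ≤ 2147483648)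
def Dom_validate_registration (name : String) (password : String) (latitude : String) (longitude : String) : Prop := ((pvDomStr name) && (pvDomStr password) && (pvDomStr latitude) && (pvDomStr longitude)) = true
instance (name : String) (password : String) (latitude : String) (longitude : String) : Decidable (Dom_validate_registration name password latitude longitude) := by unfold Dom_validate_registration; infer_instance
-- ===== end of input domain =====

-- B replaces A's three separate lazy any(...) scans of the password by ONE accumulator
-- pass computing the digit/letter/special flags at once (objective: alternative; same cost).
-- latitude/longitude are unused by both, as in the Python.

-- ===== PORT A =====
-- literal transliteration of the if/elif chain; isnumeric = isdigit on the ASCII domain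
def validate_registration (name : String) (password : String) (latitude : String) (longitude : String) : String :=
  if PySem.Str.len name < 6 then
    "Username must be at least 6 characters"
  else if PySem.Str.len password < 6 then
    "password must be at least 6 characters"
  else if !(password.toList.any (fun c => PySem.Chars.isdigit c)) then
    "password must contain a number"
  else if !(password.toList.any (fun c => PySem.Chars.isalpha c)) then
    "password must contain a letter"
  else if !(password.toList.any (fun c => !PySem.Chars.isalnum c)) then
    "password must contain a special character"
  else
    "no error"

-- ===== PORT B =====
-- B-side helper: the single pass over the password accumulating the three flags
def scanFlags : List Char → Bool × Bool × Bool → Bool × Bool × Bool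
  | [], acc => acc
  | c :: rest, (d, a, s) =>
      scanFlags rest
        ((if PySem.Chars.isdigit c then true else d),
         (if PySem.Chars.isalpha c then true else a),
         (if !PySem.Chars.isalnum c then true else s))

def validate_registration_alt (name : String) (password : String) (latitude : String) (longitude : String) : String :=
  if PySem.Str.len name < 6 then
    "Username must be at least 6 characters"
  else if PySem.Str.len password < 6 then
    "password must be at least 6 characters"
  else
    let flags := scanFlags password.toList (false, false, false)
    if !flags.1 then "password must contain a number"
    else if !flags.2.1 then "password must contain a letter"
    else if !flags.2.2 then "password must contain a special character"
    else "no error"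

-- ===== PRECONDITION & SPEC =====
def Spec_validate_registration (name : String) (password : String) (latitude : String) (longitude : String) (out : String) : Prop := out = validate_registration_alt name password latitude longitude
instance (name : String) (password : String) (latitude : String) (longitude : String) (out : String) : Decidable (Spec_validate_registration name password latitude longitude out) := by unfold Spec_validate_registration; infer_instance

-- ===== CLAIM =====
def Claim_equal_validate_registration : Prop := ∀ (name : String) (password : String) (latitude : String) (longitude : String), Dom_validate_registration name password latitude longitude → Spec_validate_registration name password latitude longitude (validate_registration name password latitude longitude)

-- ===== LEMMAS AND PROOFS =====
theorem scanFlags_eq (l : List Char) (d a s : Bool) :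
    scanFlags l (d, a, s) =
      (d || l.any (fun c => PySem.Chars.isdigit c),
       a || l.any (fun c => PySem.Chars.isalpha c),
       s || l.any (fun c => !PySem.Chars.isalnum c)) := by
  induction l generalizing d a s with
  | nil => simp [scanFlags]
  | cons c rest ih =>
      simp only [scanFlags, ih, List.any_cons]
      split_ifs <;> simp_all

-- ===== VERDICT =====
theorem validate_registration_spec : Claim_equal_validate_registration := by
  intro name password latitude longitude _
  unfold Spec_validate_registration validate_registration validate_registration_alt
  simp only [scanFlags_eq, Bool.false_or]
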